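-- pv_equiv track=rewrite | github.com/Domine29/demos-and-notes | w3d3-big-o/examples.py | example_3
-- ===== SOURCE A (Python) =====
-- def example_3(my_list):
--     yummy_list = ["donut", "cake", "pie", "muffin"]
--
--     food_list = []
--     for item in my_list:
--         if isinstance(item, str):
--             food_list.append(item)
--
--     yummy_count = 0
--     for food in food_list:
--         for yummy in yummy_list:
--             if food == yummy:
--                 yummy_count += 1
--
--     return yummy_count
-- ===== SOURCE B (Python) =====
-- def example_3(my_list):
--     # Tally all string items in one pass, then sum four table lookups.
--     table = {}
--     for item in my_list:
--         if isinstance(item, str):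
--             table[item] = table.get(item, 0) + 1
--     return (table.get("donut", 0) + table.get("cake", 0)
--             + table.get("pie", 0) + table.get("muffin", 0))
-- ===== Notes on version B (the rewrite author's own statement) =====
-- stated objective: alternative
-- what changed: Replaces the filter-then-nested-membership scan (4 comparisons per item) with a single-pass frequency table (dict tally) followed by four constant-time lookups.
import Mathlib
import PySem

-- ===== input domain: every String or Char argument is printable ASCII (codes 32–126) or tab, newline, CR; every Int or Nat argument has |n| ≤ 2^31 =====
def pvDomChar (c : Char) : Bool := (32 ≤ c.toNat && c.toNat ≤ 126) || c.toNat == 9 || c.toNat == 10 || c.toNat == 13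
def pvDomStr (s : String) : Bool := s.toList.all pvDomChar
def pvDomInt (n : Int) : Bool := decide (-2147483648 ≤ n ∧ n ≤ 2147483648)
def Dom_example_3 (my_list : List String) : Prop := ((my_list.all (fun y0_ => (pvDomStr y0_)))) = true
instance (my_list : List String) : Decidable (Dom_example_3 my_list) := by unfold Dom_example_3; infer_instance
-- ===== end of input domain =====

-- B replaces A's filter-then-nested-membership scan by a one-pass dict tally plus four lookups (alternative decomposition, same result).

-- ===== PORT A =====
-- in Lean the argument list holds only strings, so the isinstance(item, str) test is always true
def example_3 (my_list : List String) : Int :=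
  let yummy_list : List String := ["donut", "cake", "pie", "muffin"]
  let food_list := my_list.foldl (fun acc item => acc ++ [item]) []
  let yummy_count :=
    food_list.foldl (fun acc food =>
      yummy_list.foldl (fun acc2 yummy => if food == yummy then acc2 + 1 else acc2) acc) (0 : Int)
  yummy_count

-- ===== PORT B =====
def example_3_alt (my_list : List String) : Int :=
  let table := my_list.foldl (fun d item => d.insert item (d.getD item 0 + 1))
                 (PySem.Dict.empty : PySem.Dict String Int)
  table.getD "donut" 0 + table.getD "cake" 0 + table.getD "pie" 0 + table.getD "muffin" 0

-- ===== PRECONDITION & SPEC =====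
def Spec_example_3 (my_list : List String) (out : Int) : Prop := out = example_3_alt my_list
instance (my_list : List String) (out : Int) : Decidable (Spec_example_3 my_list out) := by unfold Spec_example_3; infer_instance

-- ===== CLAIM (what is proved, stated in full; the proofs are below) =====
def Claim_equal_example_3 : Prop := ∀ (my_list : List String), Dom_example_3 my_list → Spec_example_3 my_list (example_3 my_list)

-- ===== LEMMAS AND PROOFS =====

lemma foldl_append_id (l : List String) (acc : List String) :
    l.foldl (fun acc item => acc ++ [item]) acc = acc ++ l := by
  induction l generalizing acc with
  | nil => simp
  | cons x xs ih => simp [List.foldl_cons, ih]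

lemma tally_getD (l : List String) (d : PySem.Dict String Int) (k : String) :
    (l.foldl (fun d item => d.insert item (d.getD item 0 + 1)) d).getD k 0
      = d.getD k 0 + (l.count k : Int) := by
  induction l generalizing d with
  | nil => simp
  | cons x xs ih =>
      simp only [List.foldl_cons, ih, PySem.Dict.getD_insert, List.count_cons]
      by_cases h : k = x
      · simp [h]
        ring
      · simp [h, Ne.symm h]

lemma A_foldl (l : List String) (acc : Int) :
    l.foldl (fun acc food =>
      (["donut", "cake", "pie", "muffin"] : List String).foldl
        (fun acc2 yummy => if food == yummy then acc2 + 1 else acc2) acc) acc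
      = acc + ((l.count "donut" : Int) + l.count "cake" + l.count "pie" + l.count "muffin") := by
  induction l generalizing acc with
  | nil => simp
  | cons x xs ih =>
      simp only [List.count_cons, List.foldl]
      by_cases h1 : x = "donut" <;> by_cases h2 : x = "cake" <;>
        by_cases h3 : x = "pie" <;> by_cases h4 : x = "muffin" <;>
        simp_all <;> omega

-- ===== VERDICT (by name: the statement is the Claim_ definition above) =====
theorem example_3_spec : Claim_equal_example_3 := by
  intro l _
  unfold Spec_example_3 example_3 example_3_alt
  simp only [foldl_append_id, List.nil_append]
  rw [A_foldl]
  simp only [tally_getD, PySem.Dict.getD_empty]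
  ring
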